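-- pv_equiv track=rewrite | github.com/francaracuel/UGR-GII-CCIA-4-PTC--Programacion_tecnica_y_cientifica--17-18-Practicas- | Sesión 2/sesion2.py | triple_double
-- ===== SOURCE A (Python) =====
-- def triple_double(text):
--
--     # Se cambia todo a minúsculas
--     text = str.lower(text)
--
--     # Se cuenta con que no tiene las tres parejas dobles
--     has = False
--
--     # Contador para iterar por los caracteres
--     i = 0
--
--     length = len(text)
--
--     # Si la longitud es menor que 6 no puede tenerlas
--     if length >= 6:
--
--         # Se recorren los carácteres hasta que se llega al fin. Se para cuando
--         # queden menos de 6 caracteres por comprobar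
--         while i <= length-6 and not has:
--
--             # Como se sabe seguro que no habrá desbordamiento al acceder a las
--             # posiciones del texto, se comprueba directamente si existen las 3
--             # parejas seguidas
--             if (text[i] == text[i+1]) and (text[i+2] == text[i+3]) and (text[i+4] == text[i+5]):
--                 has = True
--
--             i += 1
--
--     return has
-- ===== SOURCE B (Python) =====
-- def triple_double(text):
--     # Single pass keeping two run counters (one per index parity): a run of 3
--     # consecutive same-parity adjacent-equal positions is exactly xxyyzz.
--     text = str.lower(text)
--     even = odd = 0
--     for j in range(len(text) - 1):
--         if text[j] == text[j + 1]:
--             if j % 2 == 0: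
--                 even += 1
--                 if even == 3:
--                     return True
--             else:
--                 odd += 1
--                 if odd == 3:
--                     return True
--         else:
--             if j % 2 == 0:
--                 even = 0
--             else:
--                 odd = 0
--     return False
-- ===== Notes on version B (the rewrite author's own statement) =====
-- stated objective: alternative
-- what changed: A slides a six-character window with an index loop testing text[i..i+5] pairwise; B makes a single pass over adjacent positions keeping two per-parity run counters and reports success when a counter reaches 3, so no six-index window test exists.
import Mathlib
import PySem

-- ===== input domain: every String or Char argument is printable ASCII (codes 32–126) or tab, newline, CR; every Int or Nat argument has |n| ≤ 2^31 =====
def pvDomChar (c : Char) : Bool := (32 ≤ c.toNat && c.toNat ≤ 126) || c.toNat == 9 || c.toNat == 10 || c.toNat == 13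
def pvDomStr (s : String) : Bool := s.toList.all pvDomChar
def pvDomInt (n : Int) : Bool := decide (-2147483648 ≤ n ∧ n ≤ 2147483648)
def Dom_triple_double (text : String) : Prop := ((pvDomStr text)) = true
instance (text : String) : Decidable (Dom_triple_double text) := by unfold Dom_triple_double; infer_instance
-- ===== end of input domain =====

-- B replaces A's six-index window scan by a single pass keeping two per-parity run counters (objective: alternative).

-- ===== PORT A =====
-- A's while loop: runs while i ≤ len-6 and not has, checking text[i..i+5] pairwise; indices always in range.
def tdLoop (t : List Char) (len : Nat) (i : Nat) (has : Bool) : Bool :=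
  if _h : i ≤ len - 6 ∧ has = false then
    let has' := if t.getD i ' ' == t.getD (i+1) ' ' && (t.getD (i+2) ' ' == t.getD (i+3) ' ') && (t.getD (i+4) ' ' == t.getD (i+5) ' ') then true else has
    tdLoop t len (i+1) has'
  else has
termination_by len - 6 + 1 - i
decreasing_by omega

def triple_double (text : String) : Bool :=
  let t := (PySem.Str.lower text).toList
  let len := t.length
  if len ≥ 6 then tdLoop t len 0 false else false

-- ===== PORT B =====
-- B's for loop over j in range(len-1) with the two counters `even`, `odd`.
def tdAltLoop (t : List Char) (j : Nat) (even odd : Nat) : Bool :=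
  if _h : j < t.length - 1 then
    if t.getD j ' ' == t.getD (j+1) ' ' then
      if j % 2 == 0 then
        let e := even + 1
        if e == 3 then true else tdAltLoop t (j+1) e odd
      else
        let o := odd + 1
        if o == 3 then true else tdAltLoop t (j+1) even o
    else
      if j % 2 == 0 then tdAltLoop t (j+1) 0 odd
      else tdAltLoop t (j+1) even 0
  else false
termination_by t.length - j
decreasing_by all_goals omega

def triple_double_alt (text : String) : Bool :=
  let t := (PySem.Str.lower text).toList
  tdAltLoop t 0 0 0

-- ===== PRECONDITION & SPEC =====
def Spec_triple_double (text : String) (out : Bool) : Prop := out = triple_double_alt text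
instance (text : String) (out : Bool) : Decidable (Spec_triple_double text out) := by unfold Spec_triple_double; infer_instance

-- ===== CLAIM (what is proved, stated in full; the proofs are below) =====
def Claim_equal_triple_double : Prop := ∀ (text : String), Dom_triple_double text → Spec_triple_double text (triple_double text)

-- ===== LEMMAS AND PROOFS =====

-- adjacent-equal indicator at position k (the comparison both ports make)
def pairAt (t : List Char) (k : Nat) : Bool := t.getD k ' ' == t.getD (k+1) ' '

-- length of the maximal run of same-parity adjacent-equal positions ending at k
def run (t : List Char) : Nat → Nat
  | 0 => if pairAt t 0 then 1 else 0
  | 1 => if pairAt t 1 then 1 else 0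
  | (k+2) => if pairAt t (k+2) then run t k + 1 else 0

-- common characterisation: some same-parity run of adjacent-equal pairs reaches length 3
def P (t : List Char) : Prop := ∃ k, k < t.length - 1 ∧ 3 ≤ run t k

theorem run_step (t : List Char) (j : Nat) :
    run t j = if pairAt t j then (if 2 ≤ j then run t (j-2) else 0) + 1 else 0 := by
  match j with
  | 0 => simp [run]
  | 1 => simp [run]
  | k+2 => simp [run]

theorem run_ge1 (t : List Char) (k : Nat) (h : 1 ≤ run t k) : pairAt t k = true := by
  rw [run_step] at h
  by_cases hp : pairAt t k = true
  · exact hp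
  · rw [if_neg hp] at h; exact absurd h (by omega)

theorem run_ge_succ (t : List Char) (k m : Nat) (h : m + 2 ≤ run t k) :
    2 ≤ k ∧ m + 1 ≤ run t (k-2) := by
  rw [run_step] at h; split_ifs at h with hp h2
  · exact ⟨h2, by omega⟩
  · omega
  · omega

theorem run_ge (t : List Char) (k : Nat) (h : 3 ≤ run t k) :
    4 ≤ k ∧ pairAt t k = true ∧ pairAt t (k-2) = true ∧ pairAt t (k-4) = true := by
  have h1 := run_ge1 t k (by omega)
  have h2 := run_ge_succ t k 1 h
  have h3 := run_ge1 t (k-2) (by omega)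
  have h4 := run_ge_succ t (k-2) 0 h2.2
  have h5 := run_ge1 t (k-2-2) (by omega)
  have he : k - 2 - 2 = k - 4 := by omega
  rw [he] at h5
  exact ⟨by omega, h1, h3, h5⟩

theorem run_two_step (t : List Char) (k : Nat) :
    run t (k+2) = if pairAt t (k+2) then run t k + 1 else 0 := by
  simp [run]

theorem run_build (t : List Char) (i : Nat) (h0 : pairAt t i = true)
    (h2 : pairAt t (i+2) = true) (h4 : pairAt t (i+4) = true) : 3 ≤ run t (i+4) := by
  have r0 : 1 ≤ run t i := by
    rw [run_step, h0]; simp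
  have r2 : 2 ≤ run t (i+2) := by
    rw [run_two_step t i, h2]; simp; omega
  have h24 : run t (i+4) = if pairAt t (i+4) then run t (i+2) + 1 else 0 := by
    have := run_two_step t (i+2); rwa [show i+2+2 = i+4 by omega] at this
  rw [h24, h4]; simp; omega

-- ===== A side =====
theorem tdLoop_go (t : List Char) (len : Nat) (h6 : 6 ≤ len) :
    ∀ d i has, len - 6 + 1 - i ≤ d →
    (tdLoop t len i has = true ↔ (has = true ∨ ∃ k, i ≤ k ∧ k ≤ len - 6 ∧
      pairAt t k = true ∧ pairAt t (k+2) = true ∧ pairAt t (k+4) = true)) := by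
  intro d
  induction d with
  | zero =>
    intro i has hd
    have hi : ¬ (i ≤ len - 6 ∧ has = false) := by omega
    unfold tdLoop; rw [dif_neg hi]
    constructor
    · intro h; exact Or.inl h
    · rintro (h | ⟨k, hk1, hk2, _⟩)
      · exact h
      · omega
  | succ d ih =>
    intro i has hd
    unfold tdLoop
    by_cases hc : i ≤ len - 6 ∧ has = false
    · rw [dif_pos hc]
      obtain ⟨hi, hhas⟩ := hc; subst hhas
      show tdLoop t len (i+1)
        (if t.getD i ' ' == t.getD (i+1) ' ' && (t.getD (i+2) ' ' == t.getD (i+3) ' ') && (t.getD (i+4) ' ' == t.getD (i+5) ' ') then true else false) = true ↔ _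
      have hcond : (t.getD i ' ' == t.getD (i+1) ' ' && (t.getD (i+2) ' ' == t.getD (i+3) ' ') && (t.getD (i+4) ' ' == t.getD (i+5) ' '))
          = (pairAt t i && pairAt t (i+2) && pairAt t (i+4)) := rfl
      rw [hcond]
      have hb : (if (pairAt t i && pairAt t (i+2) && pairAt t (i+4) : Bool) then true else false)
          = (pairAt t i && pairAt t (i+2) && pairAt t (i+4)) := by
        cases (pairAt t i && pairAt t (i+2) && pairAt t (i+4)) <;> simp
      rw [hb, ih (i+1) _ (by omega)]
      constructor
      · rintro (h' | ⟨k, hk1, hk2, hk⟩)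
        · have hsplit : (pairAt t i = true ∧ pairAt t (i+2) = true) ∧ pairAt t (i+4) = true := by
            simpa using h'
          exact Or.inr ⟨i, le_refl i, hi, hsplit.1.1, hsplit.1.2, hsplit.2⟩
        · exact Or.inr ⟨k, by omega, hk2, hk⟩
      · rintro (h | ⟨k, hk1, hk2, hk⟩)
        · exact absurd h (by simp)
        · rcases Nat.eq_or_lt_of_le hk1 with he | hl
          · subst he
            exact Or.inl (by rw [hk.1, hk.2.1, hk.2.2]; rfl)
          · exact Or.inr ⟨k, by omega, hk2, hk⟩
    · rw [dif_neg hc]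
      cases has with
      | true => simp
      | false =>
        have hi : ¬ i ≤ len - 6 := fun h => hc ⟨h, rfl⟩
        constructor
        · intro h; exact absurd h (by simp)
        · rintro (h | ⟨k, hk1, hk2, _⟩)
          · exact h
          · exact absurd hk2 (by omega)

theorem A_iff (t : List Char) :
    ((if t.length ≥ 6 then tdLoop t t.length 0 false else false) = true) ↔ P t := by
  by_cases h6 : t.length ≥ 6
  · rw [if_pos h6, tdLoop_go t t.length h6 (t.length - 6 + 1) 0 false (by omega)]
    simp only [Bool.false_eq_true, false_or]
    constructor
    · rintro ⟨k, _, hk2, hp0, hp2, hp4⟩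
      exact ⟨k + 4, by omega, run_build t k hp0 hp2 hp4⟩
    · rintro ⟨k, hk, hr⟩
      obtain ⟨hk4, hp0, hp2, hp4⟩ := run_ge t k hr
      refine ⟨k - 4, by omega, by omega, hp4 , ?_, ?_⟩
      · have : k - 4 + 2 = k - 2 := by omega
        rw [this]; exact hp2
      · have : k - 4 + 4 = k := by omega
        rw [this]; exact hp0
  · rw [if_neg h6]
    simp only [Bool.false_eq_true, false_iff]
    rintro ⟨k, hk, hr⟩
    have := (run_ge t k hr).1
    omega

-- ===== B side =====
theorem shift_counter (t : List Char) (j : Nat) :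
    (if 1 ≤ j then run t (j-1) else 0) = (if 2 ≤ j+1 then run t (j+1-2) else 0) := by
  by_cases h1 : 1 ≤ j
  · have he : j + 1 - 2 = j - 1 := by omega
    rw [if_pos h1, if_pos (by omega : 2 ≤ j+1), he]
  · rw [if_neg h1, if_neg (by omega : ¬ 2 ≤ j+1)]

theorem tdAlt_go (t : List Char) :
    ∀ d j e o, t.length - j ≤ d →
    e = (if j % 2 = 0 then (if 2 ≤ j then run t (j-2) else 0) else (if 1 ≤ j then run t (j-1) else 0)) →
    o = (if j % 2 = 0 then (if 1 ≤ j then run t (j-1) else 0) else (if 2 ≤ j then run t (j-2) else 0)) →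
    (∀ k, k < j → run t k ≤ 2) →
    (tdAltLoop t j e o = true ↔ P t) := by
  intro d
  induction d with
  | zero =>
    intro j e o hd he ho hpre
    have hj : ¬ j < t.length - 1 := by omega
    unfold tdAltLoop; rw [dif_neg hj]
    simp only [Bool.false_eq_true, false_iff]
    rintro ⟨k, hk, hr⟩
    have := hpre k (by omega)
    omega
  | succ d ih =>
    intro j e o hd he ho hpre
    unfold tdAltLoop
    by_cases hj : j < t.length - 1
    · rw [dif_pos hj]
      have hrs := run_step t j
      have hsle : (if 2 ≤ j then run t (j-2) else 0) ≤ 2 := by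
        split_ifs with h2
        · exact hpre (j-2) (by omega)
        · omega
      by_cases hp : pairAt t j = true
      · have hrj : run t j = (if 2 ≤ j then run t (j-2) else 0) + 1 := by rw [hrs, if_pos hp]
        rw [show (t.getD j ' ' == t.getD (j+1) ' ') = pairAt t j from rfl, hp, if_pos rfl]
        by_cases hp2 : j % 2 = 0
        · -- even branch
          rw [if_pos (by simp [hp2] : ((j % 2 == 0) = true))]
          have heq : e = (if 2 ≤ j then run t (j-2) else 0) := by rw [he, if_pos hp2]
          have hoq : o = (if 1 ≤ j then run t (j-1) else 0) := by rw [ho, if_pos hp2]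
          by_cases h3 : e + 1 = 3
          · rw [if_pos (by simp only [beq_iff_eq]; omega : ((e + 1 == 3) = true))]
            simp only [true_iff]
            exact ⟨j, hj, by omega⟩
          · rw [if_neg (by simp only [beq_iff_eq]; omega : ¬ ((e + 1 == 3) = true))]
            apply ih (j+1) (e+1) o (by omega)
            · rw [if_neg (by omega : ¬ (j+1) % 2 = 0), if_pos (by omega : 1 ≤ j + 1)]
              simp only [Nat.add_sub_cancel]
              omega
            · rw [if_neg (by omega : ¬ (j+1) % 2 = 0), hoq, shift_counter]
            · intro k hk
              rcases Nat.lt_succ_iff_lt_or_eq.mp hk with h | h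
              · exact hpre k h
              · subst h; omega
        · -- odd branch
          rw [if_neg (by simp [hp2] : ¬ ((j % 2 == 0) = true))]
          have heq : e = (if 1 ≤ j then run t (j-1) else 0) := by rw [he, if_neg hp2]
          have hoq : o = (if 2 ≤ j then run t (j-2) else 0) := by rw [ho, if_neg hp2]
          by_cases h3 : o + 1 = 3
          · rw [if_pos (by simp only [beq_iff_eq]; omega : ((o + 1 == 3) = true))]
            simp only [true_iff]
            exact ⟨j, hj, by omega⟩
          · rw [if_neg (by simp only [beq_iff_eq]; omega : ¬ ((o + 1 == 3) = true))]
            apply ih (j+1) e (o+1) (by omega)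
            · rw [if_pos (by omega : (j+1) % 2 = 0), heq, shift_counter]
            · rw [if_pos (by omega : (j+1) % 2 = 0), if_pos (by omega : 1 ≤ j + 1)]
              simp only [Nat.add_sub_cancel]
              omega
            · intro k hk
              rcases Nat.lt_succ_iff_lt_or_eq.mp hk with h | h
              · exact hpre k h
              · subst h; omega
      · have hpf : pairAt t j = false := by
          rcases Bool.eq_false_or_eq_true (pairAt t j) with h | h
          · exact absurd h hp
          · exact h
        have hrj : run t j = 0 := by rw [hrs, hpf]; simp
        rw [show (t.getD j ' ' == t.getD (j+1) ' ') = pairAt t j from rfl, hpf]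
        simp only [Bool.false_eq_true, if_false]
        by_cases hp2 : j % 2 = 0
        · rw [if_pos (by simp [hp2] : ((j % 2 == 0) = true))]
          have hoq : o = (if 1 ≤ j then run t (j-1) else 0) := by rw [ho, if_pos hp2]
          apply ih (j+1) 0 o (by omega)
          · rw [if_neg (by omega : ¬ (j+1) % 2 = 0), if_pos (by omega : 1 ≤ j + 1)]
            simp only [Nat.add_sub_cancel]
            omega
          · rw [if_neg (by omega : ¬ (j+1) % 2 = 0), hoq, shift_counter]
          · intro k hk
            rcases Nat.lt_succ_iff_lt_or_eq.mp hk with h | h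
            · exact hpre k h
            · subst h; omega
        · rw [if_neg (by simp [hp2] : ¬ ((j % 2 == 0) = true))]
          have heq : e = (if 1 ≤ j then run t (j-1) else 0) := by rw [he, if_neg hp2]
          apply ih (j+1) e 0 (by omega)
          · rw [if_pos (by omega : (j+1) % 2 = 0), heq, shift_counter]
          · rw [if_pos (by omega : (j+1) % 2 = 0), if_pos (by omega : 1 ≤ j + 1)]
            simp only [Nat.add_sub_cancel]
            omega
          · intro k hk
            rcases Nat.lt_succ_iff_lt_or_eq.mp hk with h | h
            · exact hpre k h
            · subst h; omega
    · rw [dif_neg hj]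
      simp only [Bool.false_eq_true, false_iff]
      rintro ⟨k, hk, hr⟩
      have := hpre k (by omega)
      omega

theorem B_iff (t : List Char) : (tdAltLoop t 0 0 0 = true) ↔ P t := by
  apply tdAlt_go t t.length 0 0 0 (by omega)
  · simp
  · simp
  · intro k hk; omega

-- ===== VERDICT (by name: the statement is the Claim_ definition above) =====
theorem triple_double_spec : Claim_equal_triple_double := by
  intro text _
  unfold Spec_triple_double triple_double triple_double_alt
  have h := (A_iff ((PySem.Str.lower text).toList)).trans (B_iff ((PySem.Str.lower text).toList)).symm
  simp only []
  rcases Bool.eq_false_or_eq_true (tdAltLoop (PySem.Str.lower text).toList 0 0 0) with hb | hb <;>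
    rcases Bool.eq_false_or_eq_true (if (PySem.Str.lower text).toList.length ≥ 6 then tdLoop (PySem.Str.lower text).toList (PySem.Str.lower text).toList.length 0 false else false) with ha | ha <;>
    simp_all
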